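-- pv_equiv track=rewrite | github.com/Emerald141/project-euler | Problems 201-300/p217_BalancedNumbers.py | solve
-- ===== SOURCE A (Python) =====
-- def solve(cap=47):
--     # N[s][d] = number of d-digit numbers (possibly with leading zeroes)
--     # whose digits sum to s
--     N = [[0 for d in range(cap // 2 + 1)] for s in range(9 * (cap // 2) + 1)]
--     # M[s][d] = number of d-digit numbers WITHOUT leading zeroes
--     # whose digits sum to s
--     M = [[0 for d in range(cap // 2 + 1)] for s in range(9 * (cap // 2) + 1)]
--     N[0][0] = 1
--     M[0][0] = 1
--     for d in range(1, cap // 2 + 1):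
--         for s in range(9 * d + 1):
--             N[s][d] += N[s][d-1]
--             for digit in range(1, min(9, s) + 1):
--                 N[s][d] += N[s-digit][d-1]
--                 M[s][d] += N[s-digit][d-1]
--
--     result = 45  # sum of all 1-digit numbers
--     for k in range(1, cap // 2 + 1):  # Assume cap is odd
--         for s in range(9 * k + 1):
--             # mid
--             result += 45 * 10 ** k * N[s][k] * M[s][k]
--             for i in range(min(9, s) + 1):
--                 # low
--                 result += 11 * M[s][k] * i * (10 ** k - 1) // 9 * N[s-i][k-1]
--                 # high
--                 result += 101 * N[s][k] * i * (10 ** (k - 1) - 1) // 9 * (10 ** k) * M[s-i][k-1]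
--                 # top
--                 result += 101 * N[s][k] * i * 10 ** (2 * k - 1) * N[s-i][k-1]
--     return result % (3 ** 15)
-- ===== SOURCE B (Python) =====
-- def solve(cap=47):
--     # staged prefix-sum DP: each level's N and M rows are both read off one
--     # running-prefix array of the previous N row; the main loop is flattened by
--     # precomputing the weighted digit-window arrays WN/WM once per k.
--     half = cap // 2
--     W = 9 * half + 1
--     N = [[1] + [0] * (9 * half)]
--     M = [[1] + [0] * (9 * half)]
--     for d in range(1, half + 1):
--         prev = N[-1]
--         P = [0]
--         for s in range(W):
--             P.append(P[s] + prev[s])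
--         nrow = []
--         mrow = []
--         for s in range(W):
--             lo = max(0, s - 9)
--             nrow.append(P[s + 1] - P[lo])
--             mrow.append(P[s] - P[lo])
--         N.append(nrow)
--         M.append(mrow)
--     result = 45
--     for k in range(1, half + 1):
--         pk = 10 ** k
--         onesk = (pk - 1) // 9
--         oneskm1 = (10 ** (k - 1) - 1) // 9
--         ptop = 10 ** (2 * k - 1)
--         Nk, Mk, Nk1, Mk1 = N[k], M[k], N[k - 1], M[k - 1]
--         WN = [sum(i * Nk1[s - i] for i in range(min(9, s) + 1)) for s in range(9 * k + 1)]
--         WM = [sum(i * Mk1[s - i] for i in range(min(9, s) + 1)) for s in range(9 * k + 1)]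
--         for s in range(9 * k + 1):
--             nk, mk = Nk[s], Mk[s]
--             result += (45 * pk * nk * mk
--                        + (11 * mk * onesk + 101 * nk * ptop) * WN[s]
--                        + 101 * nk * oneskm1 * pk * WM[s])
--     return result % (3 ** 15)
-- ===== Notes on version B (the rewrite author's own statement) =====
-- stated objective: alternative
-- what changed: B replaces A's per-cell digit loops by staged passes: each DP level builds one running-prefix-sum array of the previous N row and reads BOTH the leading-zero and the no-leading-zero counts off it as O(1) window differences, and the main loop's innermost i-loop is eliminated by precomputing weighted digit-window arrays WN/WM once per k (with the big-integer powers and repunit divisions hoisted out), leaving a flat s-loop of one algebraic expression.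
import Mathlib
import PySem

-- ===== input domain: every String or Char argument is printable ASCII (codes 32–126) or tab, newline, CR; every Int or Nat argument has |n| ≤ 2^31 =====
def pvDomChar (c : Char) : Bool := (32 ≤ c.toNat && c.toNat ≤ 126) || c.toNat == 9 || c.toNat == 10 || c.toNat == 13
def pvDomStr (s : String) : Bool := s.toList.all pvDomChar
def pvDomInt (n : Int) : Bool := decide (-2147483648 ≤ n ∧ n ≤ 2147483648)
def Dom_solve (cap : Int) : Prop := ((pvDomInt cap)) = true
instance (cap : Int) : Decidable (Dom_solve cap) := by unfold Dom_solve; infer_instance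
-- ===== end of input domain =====

-- B recomputes the digit-sum tables with staged prefix-sum passes (both counts read off one
-- running-prefix array as window differences) and flattens the main loop's innermost digit
-- loop into precomputed weighted-window arrays; same asymptotic class, restructured passes.

-- ===== PORT A =====
-- A's 2-D Python lists N[s][d], M[s][d] are ported as Array (Array Int); `N[s][d] = v` is pvSet,
-- `N[s][d]` is pvGet (exact for the in-range, nonnegative indices A uses on Pre_solve; .toNat is
-- safe there because every index A computes is ≥ 0).  Exponents 10**k etc. are ported with Nat
-- exponents k.toNat: on Pre_solve every exponent A computes is ≥ 0.
def pvGet (t : Array (Array Int)) (s d : Int) : Int :=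
  (t.getD s.toNat #[]).getD d.toNat 0

def pvSet (t : Array (Array Int)) (s d v : Int) : Array (Array Int) :=
  t.modify s.toNat (fun row => row.setIfInBounds d.toNat v)

def solve (cap : Int) : Int :=
  let half := PySem.Int.floordiv cap 2
  let N : Array (Array Int) :=
    Array.replicate (9 * half + 1).toNat (Array.replicate (half + 1).toNat 0)
  let M : Array (Array Int) :=
    Array.replicate (9 * half + 1).toNat (Array.replicate (half + 1).toNat 0)
  let N := pvSet N 0 0 1
  let M := pvSet M 0 0 1
  let NM :=
    (PySem.List.pyRange 1 (half + 1) 1).foldl (fun NM d =>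
      (PySem.List.pyRange 0 (9 * d + 1) 1).foldl (fun NM s =>
        let N := pvSet NM.1 s d (pvGet NM.1 s d + pvGet NM.1 s (d - 1))
        (PySem.List.pyRange 1 (min 9 s + 1) 1).foldl (fun NM digit =>
          (pvSet NM.1 s d (pvGet NM.1 s d + pvGet NM.1 (s - digit) (d - 1)),
           pvSet NM.2 s d (pvGet NM.2 s d + pvGet NM.1 (s - digit) (d - 1)))) (N, NM.2)) NM)
      (N, M)
  let N := NM.1
  let M := NM.2
  let result : Int := 45
  let result :=
    (PySem.List.pyRange 1 (half + 1) 1).foldl (fun result k =>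
      (PySem.List.pyRange 0 (9 * k + 1) 1).foldl (fun result s =>
        let result := result + 45 * 10 ^ k.toNat * pvGet N s k * pvGet M s k
        (PySem.List.pyRange 0 (min 9 s + 1) 1).foldl (fun result i =>
          let result := result +
            PySem.Int.floordiv (11 * pvGet M s k * i * (10 ^ k.toNat - 1)) 9 *
              pvGet N (s - i) (k - 1)
          let result := result +
            PySem.Int.floordiv (101 * pvGet N s k * i * (10 ^ (k - 1).toNat - 1)) 9 *
              10 ^ k.toNat * pvGet M (s - i) (k - 1)
          result + 101 * pvGet N s k * i * 10 ^ (2 * k - 1).toNat * pvGet N (s - i) (k - 1))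
          result) result) result
  PySem.Int.mod result (3 ^ 15)

-- ===== PORT B =====
-- B's Python lists N, M (rows appended level by level), the per-level prefix array P (appended
-- element by element) and the rows nrow/mrow are ported as Arrays grown with push; the
-- comprehensions WN/WM are List.map over the range; indexing is getD with .toNat (exact for the
-- in-range, nonnegative indices B uses on Pre_solve).
def solve_alt (cap : Int) : Int :=
  let half := PySem.Int.floordiv cap 2
  let W := 9 * half + 1
  let N : Array (Array Int) := #[((1 : Int) :: List.replicate (9 * half).toNat 0).toArray]
  let M : Array (Array Int) := #[((1 : Int) :: List.replicate (9 * half).toNat 0).toArray]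
  let NM :=
    (PySem.List.pyRange 1 (half + 1) 1).foldl (fun NM _d =>
      let prev := NM.1.getD (NM.1.size - 1) #[]
      let P := (PySem.List.pyRange 0 W 1).foldl (fun P s =>
          P.push (P.getD s.toNat 0 + prev.getD s.toNat 0)) #[(0 : Int)]
      let nrow := (PySem.List.pyRange 0 W 1).foldl (fun nrow s =>
          let lo := max 0 (s - 9)
          nrow.push (P.getD (s + 1).toNat 0 - P.getD lo.toNat 0)) (#[] : Array Int)
      let mrow := (PySem.List.pyRange 0 W 1).foldl (fun mrow s =>
          let lo := max 0 (s - 9)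
          mrow.push (P.getD s.toNat 0 - P.getD lo.toNat 0)) (#[] : Array Int)
      (NM.1.push nrow, NM.2.push mrow)) (N, M)
  let N := NM.1
  let M := NM.2
  let result :=
    (PySem.List.pyRange 1 (half + 1) 1).foldl (fun result k =>
      let pk : Int := 10 ^ k.toNat
      let onesk := PySem.Int.floordiv (pk - 1) 9
      let oneskm1 := PySem.Int.floordiv (10 ^ (k - 1).toNat - 1) 9
      let ptop : Int := 10 ^ (2 * k - 1).toNat
      let Nk := N.getD k.toNat #[]
      let Mk := M.getD k.toNat #[]
      let Nk1 := N.getD (k - 1).toNat #[]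
      let Mk1 := M.getD (k - 1).toNat #[]
      let WN := (PySem.List.pyRange 0 (9 * k + 1) 1).map (fun s =>
          (PySem.List.pyRange 0 (min 9 s + 1) 1).foldl
            (fun acc i => acc + i * Nk1.getD (s - i).toNat 0) 0)
      let WM := (PySem.List.pyRange 0 (9 * k + 1) 1).map (fun s =>
          (PySem.List.pyRange 0 (min 9 s + 1) 1).foldl
            (fun acc i => acc + i * Mk1.getD (s - i).toNat 0) 0)
      (PySem.List.pyRange 0 (9 * k + 1) 1).foldl (fun result s =>
          let nk := Nk.getD s.toNat 0
          let mk := Mk.getD s.toNat 0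
          result + (45 * pk * nk * mk
            + (11 * mk * onesk + 101 * nk * ptop) * (WN.getD s.toNat 0)
            + 101 * nk * oneskm1 * pk * (WM.getD s.toNat 0))) result) (45 : Int)
  PySem.Int.mod result (3 ^ 15)

-- ===== PRECONDITION & SPEC =====
-- On cap < 0 Python A's tables are empty and `N[0][0] = 1` raises IndexError; Pre_ excludes exactly those.
def Pre_solve (cap : Int) : Prop := 0 ≤ cap
instance (cap : Int) : Decidable (Pre_solve cap) := by unfold Pre_solve; infer_instance
def pvWitness_solve : Int := 5

def Spec_solve (cap : Int) (out : Int) : Prop := out = solve_alt cap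
instance (cap : Int) (out : Int) : Decidable (Spec_solve cap out) := by unfold Spec_solve; infer_instance

-- ===== CLAIM (what is proved, stated in full; the proofs are below) =====
def Claim_equal_solve : Prop := ∀ (cap : Int), Dom_solve cap → Pre_solve cap → Spec_solve cap (solve cap)

-- ===== LEMMAS AND PROOFS =====

-- ---- the pure-function layer: a mathematical model of the digit-sum tables ----
def pvUpd (f : Int → Int → Int) (s d v : Int) : Int → Int → Int :=
  fun s' d' => if s' = s ∧ d' = d then v else f s' d'

-- pvT d s = number of d-digit strings (leading zeros allowed) with digit sum s.
def pvT : Nat → Int → Int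
  | 0, s => if s = 0 then 1 else 0
  | d + 1, s => ((PySem.List.pyRange 0 (min 9 s + 1) 1).map (fun g => pvT d (s - g))).sum

-- pvMT d s = the same without leading zero (first digit ≥ 1), as A's M table holds it.
def pvMT : Nat → Int → Int
  | 0, s => if s = 0 then 1 else 0
  | d + 1, s => pvT (d + 1) s - pvT d s

theorem pvT_neg (d : Nat) (s : Int) (hs : s < 0) : pvT d s = 0 := by
  cases d with
  | zero => simp [pvT]; omega
  | succ d =>
    have h : PySem.List.pyRange 0 (min 9 s + 1) 1 = [] :=
      PySem.List.pyRange_one_eq_nil (by omega)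
    simp [pvT, h]

theorem pvT_gt (d : Nat) (s : Int) (hs : 9 * d < s) : pvT d s = 0 := by
  induction d generalizing s with
  | zero => simp [pvT]; omega
  | succ d ih =>
    rw [pvT]
    apply List.sum_eq_zero
    intro x hx
    obtain ⟨g, hg, rfl⟩ := List.mem_map.mp hx
    rw [PySem.List.mem_pyRange_one] at hg
    exact ih _ (by push_cast at hs ⊢; omega)

theorem pvT_succ (d : Nat) (s : Int) (hs : 0 ≤ s) :
    pvT (d + 1) s =
      pvT d s + ((PySem.List.pyRange 1 (min 9 s + 1) 1).map (fun g => pvT d (s - g))).sum := by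
  rw [pvT, PySem.List.pyRange_one_cons (by omega)]
  simp

theorem pvT_out (d : Nat) (s : Int) (h : s < 0 ∨ 9 * (d : Int) < s) : pvT d s = 0 := by
  rcases h with h | h
  · exact pvT_neg d s h
  · exact pvT_gt d s (by exact_mod_cast h)

-- table updates
theorem pvUpd_same (f : Int → Int → Int) (s d v : Int) : pvUpd f s d v s d = v := by
  simp [pvUpd]
theorem pvUpd_col (f : Int → Int → Int) (s d v s' d' : Int) (h : d' ≠ d) :
    pvUpd f s d v s' d' = f s' d' := by
  simp [pvUpd]; intro _ h'; exact absurd h' h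
theorem pvUpd_pvUpd (f : Int → Int → Int) (s d v w : Int) :
    pvUpd (pvUpd f s d v) s d w = pvUpd f s d w := by
  funext s' d'; by_cases h : s' = s ∧ d' = d <;> simp [pvUpd, h]
-- target table shapes for A
def pvAN (d0 : Int) : Int → Int → Int :=
  fun s d => if 0 ≤ d ∧ d ≤ d0 then pvT d.toNat s else 0
def pvAM (d0 : Int) : Int → Int → Int :=
  fun s d => if d = 0 then pvT 0 s
    else if 1 ≤ d ∧ d ≤ d0 then pvT d.toNat s - pvT (d - 1).toNat s else 0
def pvANmid (dd s0 : Int) : Int → Int → Int :=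
  fun s d => if 0 ≤ d ∧ d ≤ dd - 1 then pvT d.toNat s
    else if d = dd ∧ 0 ≤ s ∧ s < s0 then pvT d.toNat s else 0
def pvAMmid (dd s0 : Int) : Int → Int → Int :=
  fun s d => if d = 0 then pvT 0 s
    else if 1 ≤ d ∧ d ≤ dd - 1 then pvT d.toNat s - pvT (d - 1).toNat s
    else if d = dd ∧ 0 ≤ s ∧ s < s0 then pvT d.toNat s - pvT (d - 1).toNat s else 0

-- A's innermost digit loop in closed form
theorem pvInnerA (l : List Int) (N M : Int → Int → Int) (s d : Int) :
    l.foldl (fun NM digit =>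
        (pvUpd NM.1 s d (NM.1 s d + NM.1 (s - digit) (d - 1)),
         pvUpd NM.2 s d (NM.2 s d + NM.1 (s - digit) (d - 1)))) (N, M)
    = (pvUpd N s d (N s d + (l.map (fun g => N (s - g) (d - 1))).sum),
       pvUpd M s d (M s d + (l.map (fun g => N (s - g) (d - 1))).sum)) := by
  induction l generalizing N M with
  | nil =>
    simp only [List.foldl_nil, List.map_nil, List.sum_nil, add_zero]
    rw [Prod.mk.injEq]
    constructor <;>
      · funext s' d'
        by_cases h : s' = s ∧ d' = d
        · obtain ⟨rfl, rfl⟩ := h; rw [pvUpd_same]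
        · simp [pvUpd, h]
  | cons g t ih =>
    rw [List.foldl_cons, ih]
    have hcol : ∀ (f : Int → Int → Int) v x, pvUpd f s d v x (d - 1) = f x (d - 1) :=
      fun f v x => pvUpd_col f s d v x (d - 1) (by omega)
    simp only [hcol, pvUpd_pvUpd, pvUpd_same, List.map_cons, List.sum_cons]
    rw [Prod.mk.injEq]
    constructor <;> · congr 1; ring

-- A: one iteration of the s loop at row dd
theorem pvStepA (dd s0 : Int) (hdd : 1 ≤ dd) (h0 : 0 ≤ s0) :
    (PySem.List.pyRange 1 (min 9 s0 + 1) 1).foldl (fun NM digit =>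
        (pvUpd NM.1 s0 dd (NM.1 s0 dd + NM.1 (s0 - digit) (dd - 1)),
         pvUpd NM.2 s0 dd (NM.2 s0 dd + NM.1 (s0 - digit) (dd - 1))))
      (pvUpd (pvANmid dd s0) s0 dd
        ((pvANmid dd s0) s0 dd + (pvANmid dd s0) s0 (dd - 1)), pvAMmid dd s0)
    = (pvANmid dd (s0 + 1), pvAMmid dd (s0 + 1)) := by
  rw [pvInnerA]
  have hN0 : (pvANmid dd s0) s0 dd = 0 := by simp only [pvANmid]; split_ifs with h1 h2 <;> omega
  have hN1 : (pvANmid dd s0) s0 (dd - 1) = pvT (dd - 1).toNat s0 := by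
    simp only [pvANmid]; split_ifs with h1 <;> omega
  have hM0 : (pvAMmid dd s0) s0 dd = 0 := by
    simp only [pvAMmid]; split_ifs with h1 h2 h3 <;> omega
  have hread : ∀ v x, pvUpd (pvANmid dd s0) s0 dd v x (dd - 1) = pvT (dd - 1).toNat x := by
    intro v x
    rw [pvUpd_col _ _ _ _ _ _ (by omega)]
    simp only [pvANmid]; split_ifs with h1 <;> omega
  have htn : (dd - 1).toNat + 1 = dd.toNat := by omega
  have hsum : ((PySem.List.pyRange 1 (min 9 s0 + 1) 1).map
      (fun g => pvT (dd - 1).toNat (s0 - g))).sum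
      = pvT dd.toNat s0 - pvT (dd - 1).toNat s0 := by
    have := pvT_succ (dd - 1).toNat s0 h0
    rw [htn] at this
    rw [this]; ring
  simp only [hread, pvUpd_pvUpd, pvUpd_same, hN0, hN1, hM0, hsum]
  rw [Prod.mk.injEq]
  constructor
  · funext x y
    by_cases h : x = s0 ∧ y = dd
    · rw [h.1, h.2, pvUpd_same]
      simp only [pvANmid]
      rw [if_neg (show ¬(0 ≤ dd ∧ dd ≤ dd - 1) by omega),
        if_pos (show True ∧ 0 ≤ s0 ∧ s0 < s0 + 1 from ⟨trivial, h0, by omega⟩)]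
      ring
    · rw [show pvUpd (pvANmid dd s0) s0 dd (0 + pvT (dd-1).toNat s0 + (pvT dd.toNat s0 - pvT (dd-1).toNat s0)) x y = (pvANmid dd s0) x y from by simp [pvUpd, h]]
      simp only [pvANmid]; split_ifs with h1 h2 h3 <;> first | rfl | omega
  · funext x y
    by_cases h : x = s0 ∧ y = dd
    · rw [h.1, h.2, pvUpd_same]
      simp only [pvAMmid]
      rw [if_neg (show ¬dd = 0 by omega), if_neg (show ¬(1 ≤ dd ∧ dd ≤ dd - 1) by omega),
        if_pos (show True ∧ 0 ≤ s0 ∧ s0 < s0 + 1 from ⟨trivial, h0, by omega⟩)]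
      ring
    · rw [show pvUpd (pvAMmid dd s0) s0 dd (0 + (pvT dd.toNat s0 - pvT (dd-1).toNat s0)) x y = (pvAMmid dd s0) x y from by simp [pvUpd, h]]
      simp only [pvAMmid]; split_ifs with h1 h2 h3 h4 <;> first | rfl | omega

-- A: the whole s loop at row dd
theorem pvSLoopA (dd : Int) (hdd : 1 ≤ dd) : ∀ (n : Nat) (s0 : Int), 0 ≤ s0 →
    s0 + n = 9 * dd + 1 →
    (PySem.List.pyRange s0 (9 * dd + 1) 1).foldl (fun NM s =>
        (PySem.List.pyRange 1 (min 9 s + 1) 1).foldl (fun NM digit =>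
          (pvUpd NM.1 s dd (NM.1 s dd + NM.1 (s - digit) (dd - 1)),
           pvUpd NM.2 s dd (NM.2 s dd + NM.1 (s - digit) (dd - 1))))
          (pvUpd NM.1 s dd (NM.1 s dd + NM.1 s (dd - 1)), NM.2))
      (pvANmid dd s0, pvAMmid dd s0)
    = (pvANmid dd (9 * dd + 1), pvAMmid dd (9 * dd + 1)) := by
  intro n
  induction n with
  | zero =>
    intro s0 h0 hend
    rw [PySem.List.pyRange_one_eq_nil (by omega), List.foldl_nil]
    have : s0 = 9 * dd + 1 := by omega
    rw [this]
  | succ n ih =>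
    intro s0 h0 hend
    rw [PySem.List.pyRange_one_cons (by omega), List.foldl_cons]
    have hstep := pvStepA dd s0 hdd h0
    simp only at hstep ⊢
    rw [hstep]
    exact ih (s0 + 1) (by omega) (by omega)

-- shapes at the start and end of a row
theorem pvANmid_zero (dd : Int) : pvANmid dd 0 = pvAN (dd - 1) := by
  funext s d; simp only [pvANmid, pvAN]; split_ifs <;> first | rfl | omega
theorem pvAMmid_zero (dd : Int) : pvAMmid dd 0 = pvAM (dd - 1) := by
  funext s d; simp only [pvAMmid, pvAM]; split_ifs <;> first | rfl | omega
theorem pvANmid_end (dd : Int) (hdd : 1 ≤ dd) : pvANmid dd (9 * dd + 1) = pvAN dd := by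
  funext s d
  simp only [pvANmid, pvAN]
  split_ifs with h1 h2 h3
  all_goals first | rfl | omega | (rw [pvT_out _ _ (by omega)])
theorem pvAMmid_end (dd : Int) (hdd : 1 ≤ dd) : pvAMmid dd (9 * dd + 1) = pvAM dd := by
  funext s d
  simp only [pvAMmid, pvAM]
  split_ifs with h1 h2 h3 h4
  all_goals first | rfl | omega |
    (rw [pvT_out _ _ (by omega), pvT_out _ _ (by omega)]; norm_num)

-- A: the whole fill loop
theorem pvDLoopA (half : Int) : ∀ (n : Nat) (d0 : Int), 1 ≤ d0 → d0 + n = half + 1 →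
    (PySem.List.pyRange d0 (half + 1) 1).foldl (fun NM d =>
        (PySem.List.pyRange 0 (9 * d + 1) 1).foldl (fun NM s =>
          (PySem.List.pyRange 1 (min 9 s + 1) 1).foldl (fun NM digit =>
            (pvUpd NM.1 s d (NM.1 s d + NM.1 (s - digit) (d - 1)),
             pvUpd NM.2 s d (NM.2 s d + NM.1 (s - digit) (d - 1))))
            (pvUpd NM.1 s d (NM.1 s d + NM.1 s (d - 1)), NM.2)) NM)
      (pvAN (d0 - 1), pvAM (d0 - 1))
    = (pvAN half, pvAM half) := by
  intro n
  induction n with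
  | zero =>
    intro d0 h1 hend
    rw [PySem.List.pyRange_one_eq_nil (by omega), List.foldl_nil]
    have : d0 - 1 = half := by omega
    rw [this]
  | succ n ih =>
    intro d0 h1 hend
    rw [PySem.List.pyRange_one_cons (by omega), List.foldl_cons]
    have hrow : (PySem.List.pyRange 0 (9 * d0 + 1) 1).foldl (fun NM s =>
          (PySem.List.pyRange 1 (min 9 s + 1) 1).foldl (fun NM digit =>
            (pvUpd NM.1 s d0 (NM.1 s d0 + NM.1 (s - digit) (d0 - 1)),
             pvUpd NM.2 s d0 (NM.2 s d0 + NM.1 (s - digit) (d0 - 1))))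
            (pvUpd NM.1 s d0 (NM.1 s d0 + NM.1 s (d0 - 1)), NM.2))
        (pvAN (d0 - 1), pvAM (d0 - 1))
        = (pvAN d0, pvAM d0) := by
      rw [← pvANmid_zero d0, ← pvAMmid_zero d0]
      rw [pvSLoopA d0 h1 (9 * d0 + 1).toNat 0 (by omega) (by omega)]
      rw [pvANmid_end d0 h1, pvAMmid_end d0 h1]
    simp only at hrow ⊢
    rw [hrow]
    have h' := ih (d0 + 1) (by omega) (by omega)
    rw [add_sub_cancel_right] at h'
    exact h'

-- exact repunit division
theorem pvNineDvd (n : Nat) : (9 : Int) ∣ 10 ^ n - 1 := by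
  induction n with
  | zero => simp
  | succ n ih =>
    obtain ⟨c, hc⟩ := ih
    exact ⟨10 * c + 1, by rw [pow_succ]; omega⟩

theorem pvFdiv (x : Int) (n : Nat) :
    PySem.Int.floordiv (x * (10 ^ n - 1)) 9 = x * PySem.Int.floordiv (10 ^ n - 1) 9 := by
  obtain ⟨c, hc⟩ := pvNineDvd n
  rw [hc, PySem.Int.floordiv_eq_ediv_of_pos (by norm_num),
    PySem.Int.floordiv_eq_ediv_of_pos (by norm_num),
    show x * (9 * c) = 9 * (x * c) by ring,
    Int.mul_ediv_cancel_left _ (by norm_num), Int.mul_ediv_cancel_left _ (by norm_num)]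

-- ---- A's array layer (unchanged from the A port's shape) ----
def pvWf (t : Array (Array Int)) (R C : Nat) : Prop :=
  t.size = R ∧ ∀ (i : Nat) (row : Array Int), t[i]? = some row → row.size = C

def pvLike (t : Array (Array Int)) (F : Int → Int → Int) : Prop :=
  ∀ s d : Int, 0 ≤ s → 0 ≤ d → pvGet t s d = F s d

theorem pvGet_eq (t : Array (Array Int)) (s d : Int) :
    pvGet t s d = ((t[s.toNat]?.getD #[])[d.toNat]?).getD 0 := by
  rw [pvGet, Array.getD_eq_getD_getElem?, Array.getD_eq_getD_getElem?]

theorem pvSize_set (t : Array (Array Int)) (s d v : Int) : (pvSet t s d v).size = t.size := by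
  simp [pvSet, Array.size_modify]

theorem pvRowq_set (t : Array (Array Int)) (s d v : Int) (i : Nat) :
    (pvSet t s d v)[i]? =
      if s.toNat = i then Option.map (fun row => row.setIfInBounds d.toNat v) t[i]?
      else t[i]? := by
  simp [pvSet, Array.getElem?_modify]

theorem pvWf_set (t : Array (Array Int)) (R C : Nat) (hwf : pvWf t R C) (s d v : Int) :
    pvWf (pvSet t s d v) R C := by
  obtain ⟨h1, h2⟩ := hwf
  refine ⟨by rw [pvSize_set, h1], ?_⟩
  intro i row hrow
  rw [pvRowq_set] at hrow
  split_ifs at hrow with hcase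
  · cases hr : t[i]? with
    | none => rw [hr] at hrow; simp at hrow
    | some r =>
      rw [hr] at hrow
      simp only [Option.map_some, Option.some.injEq] at hrow
      rw [← hrow, Array.size_setIfInBounds]
      exact h2 i r hr
  · exact h2 i row hrow

theorem pvGet_set_self (t : Array (Array Int)) (R C : Nat) (hwf : pvWf t R C) (s d v : Int)
    (hs : s.toNat < R) (hd : d.toNat < C) : pvGet (pvSet t s d v) s d = v := by
  obtain ⟨h1, h2⟩ := hwf
  have hs' : s.toNat < t.size := by omega
  have hsome : t[s.toNat]? = some (t[s.toNat]'hs') := by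
    simp [Array.getElem?_eq_getElem hs']
  rw [pvGet_eq, pvRowq_set, if_pos rfl, hsome]
  simp only [Option.map_some, Option.getD_some]
  have hrsize : (t[s.toNat]'hs').size = C := h2 s.toNat _ hsome
  rw [Array.getElem?_setIfInBounds]
  rw [if_pos rfl, if_pos (by omega)]
  rfl

theorem pvGet_set_other (t : Array (Array Int)) (s d v s' d' : Int)
    (h : s.toNat ≠ s'.toNat ∨ d.toNat ≠ d'.toNat) :
    pvGet (pvSet t s d v) s' d' = pvGet t s' d' := by
  rw [pvGet_eq, pvGet_eq, pvRowq_set]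
  by_cases hrow : s.toNat = s'.toNat
  · have hd : ¬ (d.toNat = d'.toNat) := by omega
    rw [if_pos hrow]
    cases hr : t[s'.toNat]? with
    | none => simp
    | some r =>
      simp only [Option.map_some, Option.getD_some]
      rw [Array.getElem?_setIfInBounds, if_neg hd]
  · rw [if_neg hrow]

theorem pvLike_set (t : Array (Array Int)) (R C : Nat) (F : Int → Int → Int)
    (hwf : pvWf t R C) (hL : pvLike t F) (s d v : Int) (hs : 0 ≤ s) (hd : 0 ≤ d)
    (hsR : s.toNat < R) (hdC : d.toNat < C) :
    pvLike (pvSet t s d v) (pvUpd F s d v) := by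
  intro s' d' hs' hd'
  by_cases h : s' = s ∧ d' = d
  · rw [h.1, h.2, pvGet_set_self t R C hwf s d v hsR hdC, pvUpd_same]
  · rw [pvGet_set_other t s d v s' d' (by omega), hL s' d' hs' hd']
    rw [pvUpd, if_neg h]

def pvInv (NM : Array (Array Int) × Array (Array Int)) (R C : Nat)
    (FG : (Int → Int → Int) × (Int → Int → Int)) : Prop :=
  pvWf NM.1 R C ∧ pvWf NM.2 R C ∧ pvLike NM.1 FG.1 ∧ pvLike NM.2 FG.2

theorem pvSimInner (R C : Nat) (s d : Int) (hs : 0 ≤ s) (hd : 1 ≤ d)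
    (hsR : s.toNat < R) (hdC : d.toNat < C) :
    ∀ (l : List Int), (∀ x ∈ l, 1 ≤ x ∧ x ≤ s) →
    ∀ (NM : Array (Array Int) × Array (Array Int)) (FG : (Int → Int → Int) × (Int → Int → Int)),
    pvInv NM R C FG →
    pvInv (l.foldl (fun NM digit =>
        (pvSet NM.1 s d (pvGet NM.1 s d + pvGet NM.1 (s - digit) (d - 1)),
         pvSet NM.2 s d (pvGet NM.2 s d + pvGet NM.1 (s - digit) (d - 1)))) NM) R C
      (l.foldl (fun NM digit =>
        (pvUpd NM.1 s d (NM.1 s d + NM.1 (s - digit) (d - 1)),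
         pvUpd NM.2 s d (NM.2 s d + NM.1 (s - digit) (d - 1)))) FG) := by
  intro l
  induction l with
  | nil => intro _ NM FG h; exact h
  | cons g t ih =>
    intro hmem NM FG hInv
    obtain ⟨hw1, hw2, hL1, hL2⟩ := hInv
    rw [List.foldl_cons, List.foldl_cons]
    have hg := hmem g List.mem_cons_self
    have e1 : pvGet NM.1 s d = FG.1 s d := hL1 s d hs (by omega)
    have e2 : pvGet NM.1 (s - g) (d - 1) = FG.1 (s - g) (d - 1) :=
      hL1 (s - g) (d - 1) (by omega) (by omega)
    have e3 : pvGet NM.2 s d = FG.2 s d := hL2 s d hs (by omega)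
    refine ih (fun x hx => hmem x (List.mem_cons_of_mem g hx)) _ _ ?_
    rw [e1, e2, e3]
    exact ⟨pvWf_set _ _ _ hw1 _ _ _, pvWf_set _ _ _ hw2 _ _ _,
      pvLike_set _ _ _ _ hw1 hL1 s d _ hs (by omega) hsR hdC,
      pvLike_set _ _ _ _ hw2 hL2 s d _ hs (by omega) hsR hdC⟩

theorem pvSimS (R C : Nat) (half dd : Int) (hdd : 1 ≤ dd) (hdh : dd ≤ half)
    (hR : R = (9 * half + 1).toNat) (hC : C = (half + 1).toNat) :
    ∀ (l : List Int), (∀ x ∈ l, 0 ≤ x ∧ x ≤ 9 * dd) →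
    ∀ (NM : Array (Array Int) × Array (Array Int)) (FG : (Int → Int → Int) × (Int → Int → Int)),
    pvInv NM R C FG →
    pvInv (l.foldl (fun NM s =>
        let N := pvSet NM.1 s dd (pvGet NM.1 s dd + pvGet NM.1 s (dd - 1))
        (PySem.List.pyRange 1 (min 9 s + 1) 1).foldl (fun NM digit =>
          (pvSet NM.1 s dd (pvGet NM.1 s dd + pvGet NM.1 (s - digit) (dd - 1)),
           pvSet NM.2 s dd (pvGet NM.2 s dd + pvGet NM.1 (s - digit) (dd - 1)))) (N, NM.2)) NM) R C
      (l.foldl (fun NM s =>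
        (PySem.List.pyRange 1 (min 9 s + 1) 1).foldl (fun NM digit =>
          (pvUpd NM.1 s dd (NM.1 s dd + NM.1 (s - digit) (dd - 1)),
           pvUpd NM.2 s dd (NM.2 s dd + NM.1 (s - digit) (dd - 1))))
          (pvUpd NM.1 s dd (NM.1 s dd + NM.1 s (dd - 1)), NM.2)) FG) := by
  intro l
  induction l with
  | nil => intro _ NM FG h; exact h
  | cons x t ih =>
    intro hmem NM FG hInv
    obtain ⟨hw1, hw2, hL1, hL2⟩ := hInv
    rw [List.foldl_cons, List.foldl_cons]
    have hx := hmem x List.mem_cons_self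
    have hsR : x.toNat < R := by omega
    have hdC : dd.toNat < C := by omega
    have e1 : pvGet NM.1 x dd = FG.1 x dd := hL1 x dd (by omega) (by omega)
    have e2 : pvGet NM.1 x (dd - 1) = FG.1 x (dd - 1) := hL1 x (dd - 1) (by omega) (by omega)
    refine ih (fun y hy => hmem y (List.mem_cons_of_mem x hy)) _ _ ?_
    simp only []
    refine pvSimInner R C x dd (by omega) hdd hsR hdC _ ?_ _ _ ?_
    · intro y hy
      rw [PySem.List.mem_pyRange_one] at hy
      omega
    · rw [e1, e2]
      exact ⟨pvWf_set _ _ _ hw1 _ _ _, hw2,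
        pvLike_set _ _ _ _ hw1 hL1 x dd _ (by omega) (by omega) hsR hdC, hL2⟩

theorem pvSimD (R C : Nat) (half : Int)
    (hR : R = (9 * half + 1).toNat) (hC : C = (half + 1).toNat) :
    ∀ (l : List Int), (∀ x ∈ l, 1 ≤ x ∧ x ≤ half) →
    ∀ (NM : Array (Array Int) × Array (Array Int)) (FG : (Int → Int → Int) × (Int → Int → Int)),
    pvInv NM R C FG →
    pvInv (l.foldl (fun NM d =>
        (PySem.List.pyRange 0 (9 * d + 1) 1).foldl (fun NM s =>
          let N := pvSet NM.1 s d (pvGet NM.1 s d + pvGet NM.1 s (d - 1))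
          (PySem.List.pyRange 1 (min 9 s + 1) 1).foldl (fun NM digit =>
            (pvSet NM.1 s d (pvGet NM.1 s d + pvGet NM.1 (s - digit) (d - 1)),
             pvSet NM.2 s d (pvGet NM.2 s d + pvGet NM.1 (s - digit) (d - 1)))) (N, NM.2)) NM) NM)
      R C
      (l.foldl (fun NM d =>
        (PySem.List.pyRange 0 (9 * d + 1) 1).foldl (fun NM s =>
          (PySem.List.pyRange 1 (min 9 s + 1) 1).foldl (fun NM digit =>
            (pvUpd NM.1 s d (NM.1 s d + NM.1 (s - digit) (d - 1)),
             pvUpd NM.2 s d (NM.2 s d + NM.1 (s - digit) (d - 1))))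
            (pvUpd NM.1 s d (NM.1 s d + NM.1 s (d - 1)), NM.2)) NM) FG) := by
  intro l
  induction l with
  | nil => intro _ NM FG h; exact h
  | cons x t ih =>
    intro hmem NM FG hInv
    rw [List.foldl_cons, List.foldl_cons]
    have hx := hmem x List.mem_cons_self
    refine ih (fun y hy => hmem y (List.mem_cons_of_mem x hy)) _ _ ?_
    refine pvSimS R C half x hx.1 hx.2 hR hC _ ?_ _ _ hInv
    intro y hy
    rw [PySem.List.mem_pyRange_one] at hy
    omega

theorem pvInitA :
    (pvUpd (fun _ _ => 0) 0 0 1 : Int → Int → Int) = pvAN 0 := by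
  funext s d
  by_cases h : s = 0 ∧ d = 0
  · obtain ⟨rfl, rfl⟩ := h
    simp [pvUpd, pvAN, pvT]
  · rw [show pvUpd (fun _ _ => 0) 0 0 1 s d = 0 from by simp [pvUpd, h]]
    simp only [pvAN]
    by_cases hd : 0 ≤ d ∧ d ≤ 0
    · have hd0 : d = 0 := by omega
      subst hd0
      rw [if_pos hd]
      have hs : ¬s = 0 := fun hs => h ⟨hs, rfl⟩
      simp [pvT, hs]
    · rw [if_neg hd]
theorem pvInitA' :
    (pvUpd (fun _ _ => 0) 0 0 1 : Int → Int → Int) = pvAM 0 := by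
  funext s d
  by_cases hd : d = 0
  · subst hd
    simp [pvUpd, pvAM, pvT]
  · rw [show pvUpd (fun _ _ => 0) 0 0 1 s d = 0 from by
      simp [pvUpd]; intro _ h; exact absurd h hd]
    simp only [pvAM]
    rw [if_neg hd, if_neg (show ¬(1 ≤ d ∧ d ≤ 0) by omega)]

theorem pvInitArr (half : Int) (hh : 0 ≤ half) :
    pvInv (pvSet (Array.replicate (9 * half + 1).toNat (Array.replicate (half + 1).toNat 0)) 0 0 1,
           pvSet (Array.replicate (9 * half + 1).toNat (Array.replicate (half + 1).toNat 0)) 0 0 1)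
      ((9 * half + 1).toNat) ((half + 1).toNat) (pvAN 0, pvAM 0) := by
  have hwf : pvWf (Array.replicate (9 * half + 1).toNat (Array.replicate (half + 1).toNat 0))
      ((9 * half + 1).toNat) ((half + 1).toNat) := by
    refine ⟨Array.size_replicate, ?_⟩
    intro i row hr
    rw [Array.getElem?_replicate] at hr
    by_cases h : i < (9 * half + 1).toNat
    · rw [if_pos h] at hr
      cases hr
      exact Array.size_replicate
    · rw [if_neg h] at hr
      cases hr
  have hzero : pvLike (Array.replicate (9 * half + 1).toNat (Array.replicate (half + 1).toNat 0))
      (fun _ _ => 0) := by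
    intro s d _ _
    rw [pvGet_eq, Array.getElem?_replicate]
    split_ifs with h
    · simp only [Option.getD_some]
      rw [Array.getElem?_replicate]
      split_ifs <;> rfl
    · simp
  have hs0 : (0 : Int).toNat < (9 * half + 1).toNat := by omega
  have hd0 : (0 : Int).toNat < (half + 1).toNat := by omega
  refine ⟨pvWf_set _ _ _ hwf _ _ _, pvWf_set _ _ _ hwf _ _ _, ?_, ?_⟩
  · rw [← pvInitA]
    exact pvLike_set _ _ _ _ hwf hzero 0 0 1 le_rfl le_rfl hs0 hd0
  · rw [← pvInitA']
    exact pvLike_set _ _ _ _ hwf hzero 0 0 1 le_rfl le_rfl hs0 hd0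

-- ---- B's pure layer: prefix sums and weighted windows ----
def pvPS (d : Nat) : Nat → Int
  | 0 => 0
  | j + 1 => pvPS d j + pvT d j

theorem pvPS_eq (d : Nat) (j : Nat) : pvPS d j = ∑ x ∈ Finset.range j, pvT d (x : Int) := by
  induction j with
  | zero => simp [pvPS]
  | succ j ih => rw [pvPS, ih, Finset.sum_range_succ]

theorem pvSumRange (f : Nat → Int) (m : Nat) :
    ((List.range m).map f).sum = ∑ x ∈ Finset.range m, f x := rfl

theorem pvT_succ' (d : Nat) (s : Int) (_hs : 0 ≤ s) :
    pvT (d + 1) s = ∑ g ∈ Finset.range (min 9 s + 1).toNat, pvT d (s - g) := by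
  rw [pvT, PySem.List.pyRange_one]
  simp only [List.map_map, sub_zero, Function.comp_def, zero_add]
  exact pvSumRange _ _

theorem pvWindowN (d : Nat) (s : Int) (hs : 0 ≤ s) :
    pvPS d (s + 1).toNat - pvPS d (max 0 (s - 9)).toNat = pvT (d + 1) s := by
  rw [pvPS_eq, pvPS_eq, pvT_succ' d s hs,
    ← Finset.sum_Ico_eq_sub _ (by omega : (max 0 (s-9)).toNat ≤ (s+1).toNat)]
  refine Finset.sum_nbij' (fun x => s.toNat - x) (fun g => s.toNat - g) ?_ ?_ ?_ ?_ ?_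
  · intro x hx
    rw [Finset.mem_Ico] at hx
    rw [Finset.mem_range]
    dsimp only
    omega
  · intro g hg
    rw [Finset.mem_range] at hg
    rw [Finset.mem_Ico]
    dsimp only
    omega
  · intro x hx
    rw [Finset.mem_Ico] at hx
    dsimp only
    omega
  · intro g hg
    rw [Finset.mem_range] at hg
    dsimp only
    omega
  · intro x hx
    rw [Finset.mem_Ico] at hx
    dsimp only
    congr 1
    omega

theorem pvMT_window' (d : Nat) (s : Int) (hs : 0 ≤ s) :
    pvMT (d + 1) s = ∑ g ∈ Finset.range (min 9 s).toNat, pvT d (s - 1 - g) := by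
  have h := pvT_succ d s hs
  rw [pvMT, h, PySem.List.pyRange_one]
  simp only [List.map_map, Function.comp_def]
  rw [pvSumRange]
  have : pvT d s + ∑ x ∈ Finset.range (min 9 s + 1 - 1).toNat, pvT d (s - (1 + x)) - pvT d s
      = ∑ x ∈ Finset.range (min 9 s + 1 - 1).toNat, pvT d (s - (1 + x)) := by ring
  rw [this]
  apply Finset.sum_congr
  · congr 1; omega
  · intro x _
    congr 1; omega

theorem pvWindowM (d : Nat) (s : Int) (hs : 0 ≤ s) :
    pvPS d s.toNat - pvPS d (max 0 (s - 9)).toNat = pvMT (d + 1) s := by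
  rw [pvPS_eq, pvPS_eq, pvMT_window' d s hs,
    ← Finset.sum_Ico_eq_sub _ (by omega : (max 0 (s-9)).toNat ≤ s.toNat)]
  refine Finset.sum_nbij' (fun x => s.toNat - 1 - x) (fun g => s.toNat - 1 - g) ?_ ?_ ?_ ?_ ?_
  · intro x hx
    rw [Finset.mem_Ico] at hx
    rw [Finset.mem_range]
    dsimp only
    omega
  · intro g hg
    rw [Finset.mem_range] at hg
    rw [Finset.mem_Ico]
    dsimp only
    omega
  · intro x hx
    rw [Finset.mem_Ico] at hx
    dsimp only
    omega
  · intro g hg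
    rw [Finset.mem_range] at hg
    dsimp only
    omega
  · intro x hx
    rw [Finset.mem_Ico] at hx
    dsimp only
    congr 1
    omega

-- B's weighted windows, as the model sums
def pvWN (d : Nat) (s : Int) : Int :=
  ((PySem.List.pyRange 0 (min 9 s + 1) 1).map (fun i => i * pvT d (s - i))).sum
def pvWM (d : Nat) (s : Int) : Int :=
  ((PySem.List.pyRange 0 (min 9 s + 1) 1).map (fun i => i * pvMT d (s - i))).sum

-- row-collection invariant for B
def pvRows (F : Nat → Int → Int) (t : Array (Array Int)) (dmax : Nat) : Prop :=
  t.size = dmax + 1 ∧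
    ∀ d : Nat, d ≤ dmax → ∀ s : Int, 0 ≤ s → ((t.getD d #[]).getD s.toNat 0) = F d s

theorem pvGetD_push_lt {α : Type} (a : Array α) (x : α) (i : Nat) (dflt : α) (h : i < a.size) :
    (a.push x).getD i dflt = a.getD i dflt := by
  rw [Array.getD_eq_getD_getElem?, Array.getD_eq_getD_getElem?, Array.getElem?_push,
    if_neg (by omega)]

theorem pvGetD_push_eq {α : Type} (a : Array α) (x : α) (dflt : α) :
    (a.push x).getD a.size dflt = x := by
  rw [Array.getD_eq_getD_getElem?, Array.getElem?_push, if_pos rfl]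
  rfl

-- B's prefix-sum pass
theorem pvPFold (prev : Array Int) (dp : Nat)
    (hprev : ∀ s : Int, 0 ≤ s → prev.getD s.toNat 0 = pvT dp s) (W : Int) :
    ∀ (n : Nat) (s0 : Int) (P : Array Int), 0 ≤ s0 → s0 + n = W →
    P.size = s0.toNat + 1 → (∀ j : Nat, j ≤ s0.toNat → P.getD j 0 = pvPS dp j) →
    ((PySem.List.pyRange s0 W 1).foldl
        (fun P s => P.push (P.getD s.toNat 0 + prev.getD s.toNat 0)) P).size = W.toNat + 1 ∧
      ∀ j : Nat, j ≤ W.toNat →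
        ((PySem.List.pyRange s0 W 1).foldl
          (fun P s => P.push (P.getD s.toNat 0 + prev.getD s.toNat 0)) P).getD j 0 = pvPS dp j := by
  intro n
  induction n with
  | zero =>
    intro s0 P h0 hend hsz hv
    rw [PySem.List.pyRange_one_eq_nil (by omega)]
    have : s0.toNat = W.toNat := by omega
    exact ⟨by rw [List.foldl_nil, hsz, this], by rw [List.foldl_nil]; intro j hj; exact hv j (by omega)⟩
  | succ n ih =>
    intro s0 P h0 hend hsz hv
    rw [PySem.List.pyRange_one_cons (by omega), List.foldl_cons]
    have hval : P.getD s0.toNat 0 + prev.getD s0.toNat 0 = pvPS dp (s0.toNat + 1) := by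
      rw [hv s0.toNat le_rfl, hprev s0 h0, pvPS]
      congr 2
      omega
    refine ih (s0 + 1) _ (by omega) (by omega) (by rw [Array.size_push, hsz]; omega) ?_
    intro j hj
    by_cases hlt : j < P.size
    · rw [pvGetD_push_lt _ _ _ _ hlt]
      exact hv j (by omega)
    · have hje : j = P.size := by omega
      rw [hje, pvGetD_push_eq, hval, hsz]
-- B's row-building pass (generic in the pushed expression)
theorem pvRowFold (f : Int → Int) (W : Int) :
    ∀ (n : Nat) (s0 : Int) (r : Array Int), 0 ≤ s0 → s0 + n = W → r.size = s0.toNat →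
    (∀ j : Nat, j < s0.toNat → r.getD j 0 = f j) →
    ((PySem.List.pyRange s0 W 1).foldl (fun r s => r.push (f s)) r).size = W.toNat ∧
      ∀ j : Nat, j < W.toNat →
        ((PySem.List.pyRange s0 W 1).foldl (fun r s => r.push (f s)) r).getD j 0 = f j := by
  intro n
  induction n with
  | zero =>
    intro s0 r h0 hend hsz hv
    rw [PySem.List.pyRange_one_eq_nil (by omega)]
    have : s0.toNat = W.toNat := by omega
    exact ⟨by rw [List.foldl_nil, hsz, this], by rw [List.foldl_nil]; intro j hj; exact hv j (by omega)⟩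
  | succ n ih =>
    intro s0 r h0 hend hsz hv
    rw [PySem.List.pyRange_one_cons (by omega), List.foldl_cons]
    refine ih (s0 + 1) _ (by omega) (by omega) (by rw [Array.size_push, hsz]; omega) ?_
    intro j hj
    by_cases hlt : j < r.size
    · rw [pvGetD_push_lt _ _ _ _ hlt]
      exact hv j (by omega)
    · have hje : j = r.size := by omega
      rw [hje, pvGetD_push_eq, hsz]
      congr 1
      omega

theorem pvRowsPush (F : Nat → Int → Int) (t : Array (Array Int)) (dmax : Nat)
    (h : pvRows F t dmax) (row : Array Int)
    (hrow : ∀ s : Int, 0 ≤ s → row.getD s.toNat 0 = F (dmax + 1) s) :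
    pvRows F (t.push row) (dmax + 1) := by
  obtain ⟨hsz, hv⟩ := h
  refine ⟨by rw [Array.size_push, hsz], ?_⟩
  intro d hd s hs
  by_cases hlt : d < t.size
  · rw [pvGetD_push_lt _ _ _ _ hlt]
    exact hv d (by omega) s hs
  · have : d = t.size := by omega
    rw [this, pvGetD_push_eq, hsz]
    exact hrow s hs

-- one level of B's fill loop
theorem pvBStep (half : Int) (d0 : Int) (h1 : 1 ≤ d0) (h2 : d0 ≤ half)
    (N M : Array (Array Int))
    (hN : pvRows pvT N (d0 - 1).toNat) (hM : pvRows pvMT M (d0 - 1).toNat) :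
    pvRows pvT
      (N.push ((PySem.List.pyRange 0 (9 * half + 1) 1).foldl (fun nrow s =>
        nrow.push
          (((PySem.List.pyRange 0 (9 * half + 1) 1).foldl
              (fun P s => P.push (P.getD s.toNat 0 + (N.getD (N.size - 1) #[]).getD s.toNat 0))
              #[(0 : Int)]).getD (s + 1).toNat 0 -
            ((PySem.List.pyRange 0 (9 * half + 1) 1).foldl
              (fun P s => P.push (P.getD s.toNat 0 + (N.getD (N.size - 1) #[]).getD s.toNat 0))
              #[(0 : Int)]).getD (max 0 (s - 9)).toNat 0)) #[])) d0.toNat ∧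
    pvRows pvMT
      (M.push ((PySem.List.pyRange 0 (9 * half + 1) 1).foldl (fun mrow s =>
        mrow.push
          (((PySem.List.pyRange 0 (9 * half + 1) 1).foldl
              (fun P s => P.push (P.getD s.toNat 0 + (N.getD (N.size - 1) #[]).getD s.toNat 0))
              #[(0 : Int)]).getD s.toNat 0 -
            ((PySem.List.pyRange 0 (9 * half + 1) 1).foldl
              (fun P s => P.push (P.getD s.toNat 0 + (N.getD (N.size - 1) #[]).getD s.toNat 0))
              #[(0 : Int)]).getD (max 0 (s - 9)).toNat 0)) #[])) d0.toNat := by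
  have hh : (0 : Int) ≤ half := by omega
  set W : Int := 9 * half + 1 with hW
  set dp : Nat := (d0 - 1).toNat with hdp
  have hprev : ∀ s : Int, 0 ≤ s → (N.getD (N.size - 1) #[]).getD s.toNat 0 = pvT dp s := by
    intro s hs
    have : N.size - 1 = dp := by rw [hN.1]; omega
    rw [this]
    exact hN.2 dp le_rfl s hs
  have hP := pvPFold (N.getD (N.size - 1) #[]) dp hprev W W.toNat 0 #[(0 : Int)]
    le_rfl (by omega) (by simp) (by
      intro j hj
      have hj0 : j = 0 := by omega
      subst hj0
      simp [pvPS])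
  set P : Array Int := (PySem.List.pyRange 0 W 1).foldl
    (fun P s => P.push (P.getD s.toNat 0 + (N.getD (N.size - 1) #[]).getD s.toNat 0))
    #[(0 : Int)] with hPdef
  have hd0n : dp + 1 = d0.toNat := by omega
  have hfN : ∀ s : Int, 0 ≤ s → s < W →
      P.getD (s + 1).toNat 0 - P.getD (max 0 (s - 9)).toNat 0 = pvT d0.toNat s := by
    intro s hs hsW
    rw [hP.2 (s + 1).toNat (by omega), hP.2 (max 0 (s - 9)).toNat (by omega), ← hd0n]
    exact pvWindowN dp s hs
  have hfM : ∀ s : Int, 0 ≤ s → s < W →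
      P.getD s.toNat 0 - P.getD (max 0 (s - 9)).toNat 0 = pvMT d0.toNat s := by
    intro s hs hsW
    rw [hP.2 s.toNat (by omega), hP.2 (max 0 (s - 9)).toNat (by omega), ← hd0n]
    exact pvWindowM dp s hs
  have hnrow := pvRowFold
    (fun s => P.getD (s + 1).toNat 0 - P.getD (max 0 (s - 9)).toNat 0) W W.toNat 0 #[]
    le_rfl (by omega) (by simp) (by intro j hj; omega)
  have hmrow := pvRowFold
    (fun s => P.getD s.toNat 0 - P.getD (max 0 (s - 9)).toNat 0) W W.toNat 0 #[]
    le_rfl (by omega) (by simp) (by intro j hj; omega)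
  constructor
  · rw [← hd0n]
    refine pvRowsPush pvT N dp (by rwa [hdp]) _ ?_
    intro s hs
    by_cases hsW : s < W
    · have := hnrow.2 s.toNat (by omega)
      simp only at this
      have harg : ((s.toNat : Int)) = s := by omega
      rw [harg] at this
      rw [this, hfN s hs hsW, hd0n]
    · have hsize := hnrow.1
      simp only at hsize
      rw [Array.getD_eq_getD_getElem?, Array.getElem?_eq_none (by omega), hd0n]
      rw [pvT_out d0.toNat s (by right; omega)]
      rfl
  · rw [← hd0n]
    refine pvRowsPush pvMT M dp (by rwa [hdp]) _ ?_
    intro s hs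
    by_cases hsW : s < W
    · have := hmrow.2 s.toNat (by omega)
      simp only at this
      have harg : ((s.toNat : Int)) = s := by omega
      rw [harg] at this
      rw [this, hfM s hs hsW, hd0n]
    · have hsize := hmrow.1
      simp only at hsize
      rw [Array.getD_eq_getD_getElem?, Array.getElem?_eq_none (by omega), hd0n]
      have : pvMT d0.toNat s = 0 := by
        obtain ⟨m, hm⟩ : ∃ m, d0.toNat = m + 1 := ⟨d0.toNat - 1, by omega⟩
        rw [hm, pvMT, pvT_out _ _ (by right; push_cast; omega),
          pvT_out _ _ (by right; omega)]
        ring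
      rw [this]
      rfl

-- A's per-s block (mid + the i loop) equals B's single flat addend
theorem pvPerS (k : Int) (s : Int) (r : Int) :
    (PySem.List.pyRange 0 (min 9 s + 1) 1).foldl (fun result i =>
        result +
            PySem.Int.floordiv (11 * pvMT k.toNat s * i * (10 ^ k.toNat - 1)) 9 *
              pvT (k - 1).toNat (s - i) +
            PySem.Int.floordiv (101 * pvT k.toNat s * i * (10 ^ (k - 1).toNat - 1)) 9 *
              10 ^ k.toNat * pvMT (k - 1).toNat (s - i) +
            101 * pvT k.toNat s * i * 10 ^ (2 * k - 1).toNat * pvT (k - 1).toNat (s - i))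
      (r + 45 * 10 ^ k.toNat * pvT k.toNat s * pvMT k.toNat s)
    = r + (45 * 10 ^ k.toNat * pvT k.toNat s * pvMT k.toNat s
        + (11 * pvMT k.toNat s * PySem.Int.floordiv (10 ^ k.toNat - 1) 9
            + 101 * pvT k.toNat s * 10 ^ (2 * k - 1).toNat) * pvWN (k - 1).toNat s
        + 101 * pvT k.toNat s * PySem.Int.floordiv (10 ^ (k - 1).toNat - 1) 9
            * 10 ^ k.toNat * pvWM (k - 1).toNat s) := by
  have hbody : (fun (result i : Int) =>
      result +
          PySem.Int.floordiv (11 * pvMT k.toNat s * i * (10 ^ k.toNat - 1)) 9 *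
            pvT (k - 1).toNat (s - i) +
          PySem.Int.floordiv (101 * pvT k.toNat s * i * (10 ^ (k - 1).toNat - 1)) 9 *
            10 ^ k.toNat * pvMT (k - 1).toNat (s - i) +
          101 * pvT k.toNat s * i * 10 ^ (2 * k - 1).toNat * pvT (k - 1).toNat (s - i))
      = fun (result i : Int) => result +
          ((11 * pvMT k.toNat s * PySem.Int.floordiv (10 ^ k.toNat - 1) 9
              + 101 * pvT k.toNat s * 10 ^ (2 * k - 1).toNat) * (i * pvT (k - 1).toNat (s - i))
            + 101 * pvT k.toNat s * PySem.Int.floordiv (10 ^ (k - 1).toNat - 1) 9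
              * 10 ^ k.toNat * (i * pvMT (k - 1).toNat (s - i))) := by
    funext result i
    rw [pvFdiv (11 * pvMT k.toNat s * i) k.toNat,
      pvFdiv (101 * pvT k.toNat s * i) (k - 1).toNat]
    ring
  rw [hbody, PySem.List.foldl_add]
  rw [PySem.List.sum_map_add_int, PySem.List.sum_map_const_mul_int,
    PySem.List.sum_map_const_mul_int]
  show _ = r + (_ + _ * pvWN (k-1).toNat s + _ * 10 ^ k.toNat * pvWM (k-1).toNat s)
  rw [pvWN, pvWM]
  ring

theorem pvANT (half s d : Int) (h0 : 0 ≤ d) (h1 : d ≤ half) :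
    pvAN half s d = pvT d.toNat s := by
  rw [pvAN, if_pos ⟨h0, h1⟩]

theorem pvAMT (half s d : Int) (h0 : 0 ≤ d) (h1 : d ≤ half) :
    pvAM half s d = pvMT d.toNat s := by
  by_cases hd : d = 0
  · subst hd
    rw [pvAM]
    norm_num
    rfl
  · rw [pvAM, if_neg hd, if_pos ⟨by omega, h1⟩]
    obtain ⟨m, hm⟩ : ∃ m, d.toNat = m + 1 := ⟨d.toNat - 1, by omega⟩
    rw [hm, pvMT, show (d - 1).toNat = m from by omega]

-- A's model main loop rewritten to pvT/pvMT form
theorem pvAconv (half : Int) :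
    (PySem.List.pyRange 1 (half + 1) 1).foldl (fun result k =>
      (PySem.List.pyRange 0 (9 * k + 1) 1).foldl (fun result s =>
        (PySem.List.pyRange 0 (min 9 s + 1) 1).foldl (fun result i =>
          result +
              PySem.Int.floordiv (11 * pvAM half s k * i * (10 ^ k.toNat - 1)) 9 *
                pvAN half (s - i) (k - 1) +
              PySem.Int.floordiv (101 * pvAN half s k * i * (10 ^ (k - 1).toNat - 1)) 9 *
                10 ^ k.toNat * pvAM half (s - i) (k - 1) +
              101 * pvAN half s k * i * 10 ^ (2 * k - 1).toNat * pvAN half (s - i) (k - 1))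
          (result + 45 * 10 ^ k.toNat * pvAN half s k * pvAM half s k)) result) 45
    = (PySem.List.pyRange 1 (half + 1) 1).foldl (fun result k =>
      (PySem.List.pyRange 0 (9 * k + 1) 1).foldl (fun result s =>
        (PySem.List.pyRange 0 (min 9 s + 1) 1).foldl (fun result i =>
          result +
              PySem.Int.floordiv (11 * pvMT k.toNat s * i * (10 ^ k.toNat - 1)) 9 *
                pvT (k - 1).toNat (s - i) +
              PySem.Int.floordiv (101 * pvT k.toNat s * i * (10 ^ (k - 1).toNat - 1)) 9 *
                10 ^ k.toNat * pvMT (k - 1).toNat (s - i) +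
              101 * pvT k.toNat s * i * 10 ^ (2 * k - 1).toNat * pvT (k - 1).toNat (s - i))
          (result + 45 * 10 ^ k.toNat * pvT k.toNat s * pvMT k.toNat s)) result) 45 := by
  apply PySem.List.foldl_congr_mem
  intro acc k hk
  rw [PySem.List.mem_pyRange_one] at hk
  apply PySem.List.foldl_congr_mem
  intro r s hs
  rw [PySem.List.mem_pyRange_one] at hs
  rw [pvANT half s k (by omega) (by omega), pvAMT half s k (by omega) (by omega)]
  apply PySem.List.foldl_congr_mem
  intro r' i hi
  rw [PySem.List.mem_pyRange_one] at hi
  rw [pvANT half (s - i) (k - 1) (by omega) (by omega),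
    pvAMT half (s - i) (k - 1) (by omega) (by omega)]

-- ...then per-s flattening via pvPerS
theorem pvModelMain (half : Int) :
    (PySem.List.pyRange 1 (half + 1) 1).foldl (fun result k =>
      (PySem.List.pyRange 0 (9 * k + 1) 1).foldl (fun result s =>
        (PySem.List.pyRange 0 (min 9 s + 1) 1).foldl (fun result i =>
          result +
              PySem.Int.floordiv (11 * pvMT k.toNat s * i * (10 ^ k.toNat - 1)) 9 *
                pvT (k - 1).toNat (s - i) +
              PySem.Int.floordiv (101 * pvT k.toNat s * i * (10 ^ (k - 1).toNat - 1)) 9 *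
                10 ^ k.toNat * pvMT (k - 1).toNat (s - i) +
              101 * pvT k.toNat s * i * 10 ^ (2 * k - 1).toNat * pvT (k - 1).toNat (s - i))
          (result + 45 * 10 ^ k.toNat * pvT k.toNat s * pvMT k.toNat s)) result) 45
    = (PySem.List.pyRange 1 (half + 1) 1).foldl (fun result k =>
      (PySem.List.pyRange 0 (9 * k + 1) 1).foldl (fun result s =>
        result + (45 * 10 ^ k.toNat * pvT k.toNat s * pvMT k.toNat s
          + (11 * pvMT k.toNat s * PySem.Int.floordiv (10 ^ k.toNat - 1) 9
              + 101 * pvT k.toNat s * 10 ^ (2 * k - 1).toNat) * pvWN (k - 1).toNat s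
          + 101 * pvT k.toNat s * PySem.Int.floordiv (10 ^ (k - 1).toNat - 1) 9
              * 10 ^ k.toNat * pvWM (k - 1).toNat s)) result) 45 := by
  apply PySem.List.foldl_congr_mem
  intro acc k hk
  rw [PySem.List.mem_pyRange_one] at hk
  apply PySem.List.foldl_congr_mem
  intro r s _
  exact pvPerS k s r

-- B's main loop over the arrays equals the model main loop
theorem pvMainBCong (half : Int) (N M : Array (Array Int))
    (hN : pvRows pvT N half.toNat) (hM : pvRows pvMT M half.toNat) :
    (PySem.List.pyRange 1 (half + 1) 1).foldl (fun result k =>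
      (PySem.List.pyRange 0 (9 * k + 1) 1).foldl (fun result s =>
          result + (45 * 10 ^ k.toNat * ((N.getD k.toNat #[]).getD s.toNat 0)
              * ((M.getD k.toNat #[]).getD s.toNat 0)
            + (11 * ((M.getD k.toNat #[]).getD s.toNat 0) * PySem.Int.floordiv (10 ^ k.toNat - 1) 9
                + 101 * ((N.getD k.toNat #[]).getD s.toNat 0) * 10 ^ (2 * k - 1).toNat)
              * (((PySem.List.pyRange 0 (9 * k + 1) 1).map (fun s =>
                  (PySem.List.pyRange 0 (min 9 s + 1) 1).foldl
                    (fun acc i => acc + i * (N.getD (k - 1).toNat #[]).getD (s - i).toNat 0) 0)).getD s.toNat 0)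
            + 101 * ((N.getD k.toNat #[]).getD s.toNat 0)
                * PySem.Int.floordiv (10 ^ (k - 1).toNat - 1) 9 * 10 ^ k.toNat
              * (((PySem.List.pyRange 0 (9 * k + 1) 1).map (fun s =>
                  (PySem.List.pyRange 0 (min 9 s + 1) 1).foldl
                    (fun acc i => acc + i * (M.getD (k - 1).toNat #[]).getD (s - i).toNat 0) 0)).getD s.toNat 0)))
        result) (45 : Int)
    = (PySem.List.pyRange 1 (half + 1) 1).foldl (fun result k =>
      (PySem.List.pyRange 0 (9 * k + 1) 1).foldl (fun result s =>
        result + (45 * 10 ^ k.toNat * pvT k.toNat s * pvMT k.toNat s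
          + (11 * pvMT k.toNat s * PySem.Int.floordiv (10 ^ k.toNat - 1) 9
              + 101 * pvT k.toNat s * 10 ^ (2 * k - 1).toNat) * pvWN (k - 1).toNat s
          + 101 * pvT k.toNat s * PySem.Int.floordiv (10 ^ (k - 1).toNat - 1) 9
              * 10 ^ k.toNat * pvWM (k - 1).toNat s)) result) 45 := by
  apply PySem.List.foldl_congr_mem
  intro acc k hk
  rw [PySem.List.mem_pyRange_one] at hk
  have hWN : ∀ s : Int, 0 ≤ s → s < 9 * k + 1 →
      (((PySem.List.pyRange 0 (9 * k + 1) 1).map (fun s =>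
          (PySem.List.pyRange 0 (min 9 s + 1) 1).foldl
            (fun acc i => acc + i * (N.getD (k - 1).toNat #[]).getD (s - i).toNat 0) 0)).getD s.toNat 0)
        = pvWN (k - 1).toNat s := by
    intro s hs hsb
    rw [List.getD_eq_getElem?_getD, List.getElem?_map, PySem.List.getElem?_pyRange_one,
      if_pos (by omega : s.toNat < (9 * k + 1 - 0).toNat)]
    simp only [Option.map_some, Option.getD_some]
    rw [show (0 : Int) + s.toNat = s from by omega]
    have hcong : (PySem.List.pyRange 0 (min 9 s + 1) 1).foldl
        (fun acc i => acc + i * (N.getD (k - 1).toNat #[]).getD (s - i).toNat 0) 0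
        = (PySem.List.pyRange 0 (min 9 s + 1) 1).foldl
          (fun acc i => acc + i * pvT (k - 1).toNat (s - i)) 0 := by
      apply PySem.List.foldl_congr_mem
      intro a i hi
      rw [PySem.List.mem_pyRange_one] at hi
      rw [hN.2 (k - 1).toNat (by omega) (s - i) (by omega)]
    rw [hcong, PySem.List.foldl_add, pvWN, zero_add]
  have hWM : ∀ s : Int, 0 ≤ s → s < 9 * k + 1 →
      (((PySem.List.pyRange 0 (9 * k + 1) 1).map (fun s =>
          (PySem.List.pyRange 0 (min 9 s + 1) 1).foldl
            (fun acc i => acc + i * (M.getD (k - 1).toNat #[]).getD (s - i).toNat 0) 0)).getD s.toNat 0)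
        = pvWM (k - 1).toNat s := by
    intro s hs hsb
    rw [List.getD_eq_getElem?_getD, List.getElem?_map, PySem.List.getElem?_pyRange_one,
      if_pos (by omega : s.toNat < (9 * k + 1 - 0).toNat)]
    simp only [Option.map_some, Option.getD_some]
    rw [show (0 : Int) + s.toNat = s from by omega]
    have hcong : (PySem.List.pyRange 0 (min 9 s + 1) 1).foldl
        (fun acc i => acc + i * (M.getD (k - 1).toNat #[]).getD (s - i).toNat 0) 0
        = (PySem.List.pyRange 0 (min 9 s + 1) 1).foldl
          (fun acc i => acc + i * pvMT (k - 1).toNat (s - i)) 0 := by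
      apply PySem.List.foldl_congr_mem
      intro a i hi
      rw [PySem.List.mem_pyRange_one] at hi
      rw [hM.2 (k - 1).toNat (by omega) (s - i) (by omega)]
    rw [hcong, PySem.List.foldl_add, pvWM, zero_add]
  apply PySem.List.foldl_congr_mem
  intro r s hs
  rw [PySem.List.mem_pyRange_one] at hs
  rw [hN.2 k.toNat (by omega) s hs.1, hM.2 k.toNat (by omega) s hs.1,
    hWN s hs.1 hs.2, hWM s hs.1 hs.2]

-- A's main loop over the arrays equals the main loop over the model tables
theorem pvMainACong (half : Int) (NM : Array (Array Int) × Array (Array Int))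
    (hN : pvLike NM.1 (pvAN half)) (hM : pvLike NM.2 (pvAM half)) :
    (PySem.List.pyRange 1 (half + 1) 1).foldl (fun result k =>
      (PySem.List.pyRange 0 (9 * k + 1) 1).foldl (fun result s =>
        (PySem.List.pyRange 0 (min 9 s + 1) 1).foldl (fun result i =>
          result +
              PySem.Int.floordiv (11 * pvGet NM.2 s k * i * (10 ^ k.toNat - 1)) 9 *
                pvGet NM.1 (s - i) (k - 1) +
              PySem.Int.floordiv (101 * pvGet NM.1 s k * i * (10 ^ (k - 1).toNat - 1)) 9 *
                10 ^ k.toNat * pvGet NM.2 (s - i) (k - 1) +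
              101 * pvGet NM.1 s k * i * 10 ^ (2 * k - 1).toNat * pvGet NM.1 (s - i) (k - 1))
          (result + 45 * 10 ^ k.toNat * pvGet NM.1 s k * pvGet NM.2 s k)) result) 45
    = (PySem.List.pyRange 1 (half + 1) 1).foldl (fun result k =>
      (PySem.List.pyRange 0 (9 * k + 1) 1).foldl (fun result s =>
        (PySem.List.pyRange 0 (min 9 s + 1) 1).foldl (fun result i =>
          result +
              PySem.Int.floordiv (11 * pvAM half s k * i * (10 ^ k.toNat - 1)) 9 *
                pvAN half (s - i) (k - 1) +
              PySem.Int.floordiv (101 * pvAN half s k * i * (10 ^ (k - 1).toNat - 1)) 9 *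
                10 ^ k.toNat * pvAM half (s - i) (k - 1) +
              101 * pvAN half s k * i * 10 ^ (2 * k - 1).toNat * pvAN half (s - i) (k - 1))
          (result + 45 * 10 ^ k.toNat * pvAN half s k * pvAM half s k)) result) 45 := by
  apply PySem.List.foldl_congr_mem
  intro acc k hk
  rw [PySem.List.mem_pyRange_one] at hk
  apply PySem.List.foldl_congr_mem
  intro r s hs
  rw [PySem.List.mem_pyRange_one] at hs
  rw [hN s k hs.1 (by omega), hM s k hs.1 (by omega)]
  apply PySem.List.foldl_congr_mem
  intro r' i hi
  rw [PySem.List.mem_pyRange_one] at hi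
  rw [hN (s - i) (k - 1) (by omega) (by omega), hM (s - i) (k - 1) (by omega) (by omega)]

-- B's initial one-row tables
theorem pvBInitRows (half : Int) (F : Nat → Int → Int)
    (hF : ∀ s : Int, F 0 s = if s = 0 then 1 else 0) :
    pvRows F #[((1 : Int) :: List.replicate (9 * half).toNat 0).toArray] 0 := by
  refine ⟨by simp, ?_⟩
  intro d hd s hs
  have hd0 : d = 0 := by omega
  subst hd0
  have hrow : (#[((1 : Int) :: List.replicate (9 * half).toNat 0).toArray]).getD 0 #[]
      = ((1 : Int) :: List.replicate (9 * half).toNat 0).toArray := by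
    rw [Array.getD, dif_pos (by simp)]
    rfl
  rw [hrow, hF s]
  by_cases hs0 : s = 0
  · subst hs0
    rw [Array.getD_eq_getD_getElem?, List.getElem?_toArray]
    simp
  · rw [if_neg hs0, Array.getD_eq_getD_getElem?, List.getElem?_toArray]
    obtain ⟨mm, hm⟩ : ∃ mm, s.toNat = mm + 1 := ⟨s.toNat - 1, by omega⟩
    rw [hm, List.getElem?_cons_succ, List.getElem?_replicate]
    split_ifs <;> rfl

-- B's whole fill loop maintains the row invariants
theorem pvBFillAll (half : Int) (hh : 0 ≤ half) : ∀ (n : Nat) (d0 : Int), 1 ≤ d0 →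
    d0 + (n : Int) = half + 1 →
    ∀ (NM : Array (Array Int) × Array (Array Int)),
    pvRows pvT NM.1 (d0 - 1).toNat → pvRows pvMT NM.2 (d0 - 1).toNat →
    pvRows pvT (((PySem.List.pyRange d0 (half + 1) 1).foldl (fun NM _d =>
      (NM.1.push ((PySem.List.pyRange 0 (9 * half + 1) 1).foldl (fun nrow s =>
        nrow.push
          (((PySem.List.pyRange 0 (9 * half + 1) 1).foldl
              (fun P s => P.push (P.getD s.toNat 0 + (NM.1.getD (NM.1.size - 1) #[]).getD s.toNat 0))
              #[(0 : Int)]).getD (s + 1).toNat 0 -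
            ((PySem.List.pyRange 0 (9 * half + 1) 1).foldl
              (fun P s => P.push (P.getD s.toNat 0 + (NM.1.getD (NM.1.size - 1) #[]).getD s.toNat 0))
              #[(0 : Int)]).getD (max 0 (s - 9)).toNat 0)) #[]),
       NM.2.push ((PySem.List.pyRange 0 (9 * half + 1) 1).foldl (fun mrow s =>
        mrow.push
          (((PySem.List.pyRange 0 (9 * half + 1) 1).foldl
              (fun P s => P.push (P.getD s.toNat 0 + (NM.1.getD (NM.1.size - 1) #[]).getD s.toNat 0))
              #[(0 : Int)]).getD s.toNat 0 -
            ((PySem.List.pyRange 0 (9 * half + 1) 1).foldl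
              (fun P s => P.push (P.getD s.toNat 0 + (NM.1.getD (NM.1.size - 1) #[]).getD s.toNat 0))
              #[(0 : Int)]).getD (max 0 (s - 9)).toNat 0)) #[]))) NM)).1 half.toNat ∧
    pvRows pvMT (((PySem.List.pyRange d0 (half + 1) 1).foldl (fun NM _d =>
      (NM.1.push ((PySem.List.pyRange 0 (9 * half + 1) 1).foldl (fun nrow s =>
        nrow.push
          (((PySem.List.pyRange 0 (9 * half + 1) 1).foldl
              (fun P s => P.push (P.getD s.toNat 0 + (NM.1.getD (NM.1.size - 1) #[]).getD s.toNat 0))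
              #[(0 : Int)]).getD (s + 1).toNat 0 -
            ((PySem.List.pyRange 0 (9 * half + 1) 1).foldl
              (fun P s => P.push (P.getD s.toNat 0 + (NM.1.getD (NM.1.size - 1) #[]).getD s.toNat 0))
              #[(0 : Int)]).getD (max 0 (s - 9)).toNat 0)) #[]),
       NM.2.push ((PySem.List.pyRange 0 (9 * half + 1) 1).foldl (fun mrow s =>
        mrow.push
          (((PySem.List.pyRange 0 (9 * half + 1) 1).foldl
              (fun P s => P.push (P.getD s.toNat 0 + (NM.1.getD (NM.1.size - 1) #[]).getD s.toNat 0))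
              #[(0 : Int)]).getD s.toNat 0 -
            ((PySem.List.pyRange 0 (9 * half + 1) 1).foldl
              (fun P s => P.push (P.getD s.toNat 0 + (NM.1.getD (NM.1.size - 1) #[]).getD s.toNat 0))
              #[(0 : Int)]).getD (max 0 (s - 9)).toNat 0)) #[]))) NM)).2 half.toNat := by
  intro n
  induction n with
  | zero =>
    intro d0 h1 hend NM hN hM
    rw [show PySem.List.pyRange d0 (half + 1) 1 = [] from
      PySem.List.pyRange_one_eq_nil (by omega)]
    have : (d0 - 1).toNat = half.toNat := by omega
    rw [List.foldl_nil]
    rw [this] at hN hM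
    exact ⟨hN, hM⟩
  | succ n ih =>
    intro d0 h1 hend NM hN hM
    rw [show PySem.List.pyRange d0 (half + 1) 1 = d0 :: PySem.List.pyRange (d0 + 1) (half + 1) 1 from
      PySem.List.pyRange_one_cons (by omega), List.foldl_cons]
    have hstep := pvBStep half d0 h1 (by omega) NM.1 NM.2 hN hM
    refine ih (d0 + 1) (by omega) (by omega) _ ?_ ?_
    · rw [show d0 + 1 - 1 = d0 from by ring]
      exact hstep.1
    · rw [show d0 + 1 - 1 = d0 from by ring]
      exact hstep.2

-- ===== VERDICT (by name: the statement is the Claim_ definition above) =====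
theorem solve_spec : Claim_equal_solve := by
  intro cap _ hpre
  unfold Spec_solve
  show solve cap = solve_alt cap
  simp only [solve, solve_alt]
  generalize hgen : PySem.Int.floordiv cap 2 = half
  have hh : 0 ≤ half := by
    rw [← hgen, PySem.Int.floordiv_eq_ediv_of_pos (by norm_num)]
    exact Int.ediv_nonneg hpre (by norm_num)
  have hA : pvInv ((PySem.List.pyRange 1 (half + 1) 1).foldl (fun NM d =>
        (PySem.List.pyRange 0 (9 * d + 1) 1).foldl (fun NM s =>
          let N := pvSet NM.1 s d (pvGet NM.1 s d + pvGet NM.1 s (d - 1))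
          (PySem.List.pyRange 1 (min 9 s + 1) 1).foldl (fun NM digit =>
            (pvSet NM.1 s d (pvGet NM.1 s d + pvGet NM.1 (s - digit) (d - 1)),
             pvSet NM.2 s d (pvGet NM.2 s d + pvGet NM.1 (s - digit) (d - 1)))) (N, NM.2)) NM)
        (pvSet (Array.replicate (9 * half + 1).toNat (Array.replicate (half + 1).toNat 0)) 0 0 1,
         pvSet (Array.replicate (9 * half + 1).toNat (Array.replicate (half + 1).toNat 0)) 0 0 1))
      ((9 * half + 1).toNat) ((half + 1).toNat) (pvAN half, pvAM half) := by
    have hsim := pvSimD ((9 * half + 1).toNat) ((half + 1).toNat) half rfl rfl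
      (PySem.List.pyRange 1 (half + 1) 1)
      (by intro x hx; rw [PySem.List.mem_pyRange_one] at hx; omega)
      _ _ (pvInitArr half hh)
    have hD := pvDLoopA half half.toNat 1 le_rfl (by omega)
    norm_num at hD
    rwa [hD] at hsim
  have hB := pvBFillAll half hh half.toNat 1 le_rfl (by omega)
    (#[((1 : Int) :: List.replicate (9 * half).toNat 0).toArray],
     #[((1 : Int) :: List.replicate (9 * half).toNat 0).toArray])
    (by
      rw [show ((1 : Int) - 1).toNat = 0 from rfl]
      exact pvBInitRows half pvT (fun s => by rw [pvT]))
    (by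
      rw [show ((1 : Int) - 1).toNat = 0 from rfl]
      exact pvBInitRows half pvMT (fun s => by rw [pvMT]))
  rw [pvMainACong half _ hA.2.2.1 hA.2.2.2, pvAconv half, pvModelMain half,
    ← pvMainBCong half _ _ hB.1 hB.2]
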